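-- pv_equiv track=rewrite | github.com/djkostyan4ik/pp1 | 09-Test2/Test 2 (1 variant)/p2.py | f
-- ===== SOURCE A (Python) =====
-- def f(d):
--     people = 0
--     for sign in d:
--         if sign == '+':
--             people += 1
--         elif sign == '-':
--             people -= 1
--     return people
-- ===== SOURCE B (Python) =====
-- def f(d):
--     return d.count('+') - d.count('-')
-- ===== Notes on version B (the rewrite author's own statement) =====
-- stated objective: simpler
-- what changed: Replaces the explicit per-character accumulation loop with two str.count passes and a subtraction; the counting moves into the C-level str.count, which a timing run measured as a constant-factor speedup.
import Mathlib
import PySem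

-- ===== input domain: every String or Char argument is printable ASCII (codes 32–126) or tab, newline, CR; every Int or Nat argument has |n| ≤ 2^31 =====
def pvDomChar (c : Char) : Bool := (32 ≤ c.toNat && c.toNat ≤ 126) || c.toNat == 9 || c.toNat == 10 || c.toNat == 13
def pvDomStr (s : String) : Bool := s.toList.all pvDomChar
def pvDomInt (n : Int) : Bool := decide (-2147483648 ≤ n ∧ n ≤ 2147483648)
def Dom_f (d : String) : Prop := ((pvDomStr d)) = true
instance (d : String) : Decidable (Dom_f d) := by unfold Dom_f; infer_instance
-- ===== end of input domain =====

-- B replaces A's explicit accumulation loop by two str.count passes and a subtraction (simpler).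

-- ===== PORT A =====
-- 'for sign in d: if sign == '+': people += 1 elif sign == '-': people -= 1'
def f (d : String) : Int :=
  d.toList.foldl
    (fun people sign =>
      if sign == '+' then people + 1
      else if sign == '-' then people - 1
      else people) 0

-- ===== PORT B =====
-- 'return d.count('+') - d.count('-')'
def f_alt (d : String) : Int :=
  (PySem.Str.count d "+" : Int) - (PySem.Str.count d "-" : Int)

-- ===== PRECONDITION & SPEC =====
def Spec_f (d : String) (out : Int) : Prop := out = f_alt d
instance (d : String) (out : Int) : Decidable (Spec_f d out) := by unfold Spec_f; infer_instance

-- ===== CLAIM (what is proved, stated in full; the proofs are below) =====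
def Claim_equal_f : Prop := ∀ (d : String), Dom_f d → Spec_f d (f d)

-- ===== LEMMAS AND PROOFS =====

-- Python's s.count(c) for a single character c is the plain character count.
theorem chars_count_go_singleton (c : Char) (l : List Char) (fuel : Nat) (acc : Nat)
    (h : l.length ≤ fuel) :
    PySem.Chars.count.go [c] fuel l acc = acc + l.count c := by
  induction l generalizing fuel acc with
  | nil => cases fuel <;> simp [PySem.Chars.count.go]
  | cons x t ih =>
    cases fuel with
    | zero => simp at h
    | succ n =>
      simp only [List.length_cons, Nat.succ_le_succ_iff] at h
      by_cases hx : x = c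
      · subst hx
        simp [PySem.Chars.count.go, List.isPrefixOf, ih n (acc + 1) h]
        omega
      · simp [PySem.Chars.count.go, List.isPrefixOf, hx, ih n acc h, Ne.symm hx]

theorem chars_count_singleton (c : Char) (l : List Char) :
    PySem.Chars.count l [c] = l.count c := by
  simp [PySem.Chars.count, chars_count_go_singleton c l l.length 0 le_rfl]

theorem foldl_pm (l : List Char) (a : Int) :
    l.foldl
      (fun people sign =>
        if sign == '+' then people + 1
        else if sign == '-' then people - 1
        else people) a
      = a + (l.count '+' : Int) - (l.count '-' : Int) := by
  induction l generalizing a with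
  | nil => simp
  | cons x t ih =>
    simp only [List.foldl_cons, ih, List.count_cons]
    by_cases h1 : x = '+'
    · simp [h1]; ring
    · by_cases h2 : x = '-'
      · simp [h2]; ring
      · simp [h1, h2]

-- ===== VERDICT (by name: the statement is the Claim_ definition above) =====
theorem f_spec : Claim_equal_f := by
  intro d _
  show f d = f_alt d
  unfold f f_alt
  rw [foldl_pm, PySem.Str.count_eq, PySem.Str.count_eq,
    show ("+" : String).toList = ['+'] from rfl, show ("-" : String).toList = ['-'] from rfl,
    chars_count_singleton, chars_count_singleton]
  ring
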